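-- pv_equiv track=rewrite | github.com/mlinegar/ThinkingTrees | src/tree/builder.py | chunk_binary
-- ===== SOURCE A (Python) =====
-- from typing import List, Optional, Callable, Any, Dict, TYPE_CHECKING
--
-- def chunk_binary(text: str, max_chars: int = 8000) -> List[str]:
--     """
--     Split text into exactly 2 chunks for mini-tree construction.
--
--     Splits at the midpoint, preferring sentence boundaries.
--
--     Args:
--         text: Text to split
--         max_chars: Maximum characters per chunk (hint only; no truncation)
--
--     Returns:
--         List of exactly 2 chunks
--     """
--     if not text or not text.strip():
--         return ["", ""]
--
--     text = text.strip()
--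
--     # Find midpoint
--     midpoint = len(text) // 2
--
--     # Look for sentence boundary near midpoint (within 20% of doc length)
--     search_range = len(text) // 5
--     best_split = midpoint
--
--     # Search for sentence endings near midpoint
--     for offset in range(0, search_range):
--         # Check forward
--         pos = midpoint + offset
--         if pos < len(text) and text[pos] in '.!?\n':
--             best_split = pos + 1
--             break
--         # Check backward
--         pos = midpoint - offset
--         if pos > 0 and text[pos] in '.!?\n':
--             best_split = pos + 1
--             break
--
--     left = text[:best_split].strip()
--     right = text[best_split:].strip()
--
--     # Ensure we have two non-empty chunks
--     if not left:
--         left = right[:len(right)//2]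
--         right = right[len(right)//2:]
--     if not right:
--         right = left[len(left)//2:]
--         left = left[:len(left)//2]
--
--     return [left, right]
-- ===== SOURCE B (Python) =====
-- def chunk_binary(text: str, max_chars: int = 8000) -> list:
--     """Alternative decomposition: two independent first-hit scans (forward and
--     backward) combined by offset comparison, plus early-return rebalancing."""
--     if not text or not text.strip():
--         return ["", ""]
--
--     text = text.strip()
--     n = len(text)
--     midpoint = n // 2
--     search_range = n // 5
--
--     fwd = next((o for o in range(search_range)
--                 if midpoint + o < n and text[midpoint + o] in '.!?\n'), None)
--     bwd = next((o for o in range(search_range)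
--                 if midpoint - o > 0 and text[midpoint - o] in '.!?\n'), None)
--
--     if fwd is None and bwd is None:
--         best_split = midpoint
--     elif bwd is None or (fwd is not None and fwd <= bwd):
--         best_split = midpoint + fwd + 1
--     else:
--         best_split = midpoint - bwd + 1
--
--     left = text[:best_split].strip()
--     right = text[best_split:].strip()
--
--     if not left:
--         h = len(right) // 2
--         return [right[:h], right[h:]]
--     if not right:
--         h = len(left) // 2
--         return [left[:h], left[h:]]
--     return [left, right]
-- ===== Notes on version B (the rewrite author's own statement) =====
-- stated objective: alternative
-- what changed: A's single interleaved forward/backward loop with break is replaced by two independent first-hit scans (forward and backward) whose offsets are combined by a comparison with forward tie-break, and the chunk-rebalancing tail uses early returns instead of sequential reassignment.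
import Mathlib
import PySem

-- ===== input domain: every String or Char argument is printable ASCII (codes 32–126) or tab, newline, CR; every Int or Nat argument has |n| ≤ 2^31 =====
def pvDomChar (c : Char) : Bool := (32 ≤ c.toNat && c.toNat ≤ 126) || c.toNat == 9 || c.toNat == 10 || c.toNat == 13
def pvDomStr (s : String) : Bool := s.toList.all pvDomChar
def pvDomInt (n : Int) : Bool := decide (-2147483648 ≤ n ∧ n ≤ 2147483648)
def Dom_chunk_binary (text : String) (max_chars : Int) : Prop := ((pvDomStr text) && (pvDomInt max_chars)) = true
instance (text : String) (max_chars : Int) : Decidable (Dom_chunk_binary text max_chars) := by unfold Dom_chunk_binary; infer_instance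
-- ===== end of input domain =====

-- B replaces A's single interleaved break-loop by two independent first-hit scans
-- (forward and backward) combined by an offset comparison, and rebalances with
-- early returns; objective: alternative decomposition, same cost.

-- ===== PORT A =====
-- shared tiny condition helpers (both Pythons contain the same membership test and bounds checks)
def pvBoundary (c : Char) : Bool := (c == '.') || (c == '!') || (c == '?') || (c == '\n')

def pvHitF (cs : List Char) (n mid o : Int) : Bool :=
  decide (mid + o < n) &&
    (match PySem.List.pyGet? cs (mid + o) with
     | some c => pvBoundary c
     | none => false)

def pvHitB (cs : List Char) (mid o : Int) : Bool :=
  decide (0 < mid - o) &&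
    (match PySem.List.pyGet? cs (mid - o) with
     | some c => pvBoundary c
     | none => false)

-- A's for-loop with break, as structural recursion over the offset range
def pvLoopA (cs : List Char) (n mid : Int) : List Int → Int
  | [] => mid
  | o :: rest =>
    if pvHitF cs n mid o then mid + o + 1
    else if pvHitB cs mid o then mid - o + 1
    else pvLoopA cs n mid rest

-- A's tail: strip both sides, then the two sequential reassignment ifs
def pvTailA (cs : List Char) (best : Int) : List String :=
  let left := PySem.Chars.strip (PySem.List.slice cs none (some best))
  let right := PySem.Chars.strip (PySem.List.slice cs (some best) none)
  let p :=
    if left = [] then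
      (PySem.List.slice right none (some (PySem.Int.floordiv (right.length : Int) 2)),
       PySem.List.slice right (some (PySem.Int.floordiv (right.length : Int) 2)) none)
    else (left, right)
  let q :=
    if p.2 = [] then
      (PySem.List.slice p.1 none (some (PySem.Int.floordiv (p.1.length : Int) 2)),
       PySem.List.slice p.1 (some (PySem.Int.floordiv (p.1.length : Int) 2)) none)
    else p
  [String.ofList q.1, String.ofList q.2]

def chunk_binary (text : String) (max_chars : Int) : List String :=
  if text = "" || PySem.Str.strip text = "" then ["", ""]
  else
    let cs := (PySem.Str.strip text).toList
    let n : Int := cs.length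
    let midpoint := PySem.Int.floordiv n 2
    let search_range := PySem.Int.floordiv n 5
    let best := pvLoopA cs n midpoint (PySem.List.pyRange 0 search_range 1)
    pvTailA cs best

-- ===== PORT B =====
-- B's tail: early returns, each half split once
def pvTailB (cs : List Char) (best : Int) : List String :=
  let left := PySem.Chars.strip (PySem.List.slice cs none (some best))
  let right := PySem.Chars.strip (PySem.List.slice cs (some best) none)
  if left = [] then
    let h := PySem.Int.floordiv (right.length : Int) 2
    [String.ofList (PySem.List.slice right none (some h)),
     String.ofList (PySem.List.slice right (some h) none)]
  else if right = [] then
    let h := PySem.Int.floordiv (left.length : Int) 2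
    [String.ofList (PySem.List.slice left none (some h)),
     String.ofList (PySem.List.slice left (some h) none)]
  else [String.ofList left, String.ofList right]

def chunk_binary_alt (text : String) (max_chars : Int) : List String :=
  if text = "" || PySem.Str.strip text = "" then ["", ""]
  else
    let cs := (PySem.Str.strip text).toList
    let n : Int := cs.length
    let midpoint := PySem.Int.floordiv n 2
    let search_range := PySem.Int.floordiv n 5
    let r := PySem.List.pyRange 0 search_range 1
    let fwd := r.find? (fun o => pvHitF cs n midpoint o)
    let bwd := r.find? (fun o => pvHitB cs midpoint o)
    let best :=
      match fwd, bwd with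
      | none, none => midpoint
      | some f, none => midpoint + f + 1
      | none, some b => midpoint - b + 1
      | some f, some b => if f ≤ b then midpoint + f + 1 else midpoint - b + 1
    pvTailB cs best

-- ===== PRECONDITION & SPEC =====
def Spec_chunk_binary (text : String) (max_chars : Int) (out : List String) : Prop := out = chunk_binary_alt text max_chars
instance (text : String) (max_chars : Int) (out : List String) : Decidable (Spec_chunk_binary text max_chars out) := by unfold Spec_chunk_binary; infer_instance

-- ===== CLAIM (what is proved, stated in full; the proofs are below) =====
def Claim_equal_chunk_binary : Prop := ∀ (text : String) (max_chars : Int), Dom_chunk_binary text max_chars → Spec_chunk_binary text max_chars (chunk_binary text max_chars)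

-- ===== LEMMAS AND PROOFS =====

-- A's first-hit interleaved loop equals the comparison of the two independent first hits
lemma pvLoop_eq (cs : List Char) (n mid : Int) (l : List Int) (hl : l.Pairwise (· < ·)) :
    pvLoopA cs n mid l =
      match l.find? (fun o => pvHitF cs n mid o), l.find? (fun o => pvHitB cs mid o) with
      | none, none => mid
      | some f, none => mid + f + 1
      | none, some b => mid - b + 1
      | some f, some b => if f ≤ b then mid + f + 1 else mid - b + 1 := by
  induction l with
  | nil => rfl
  | cons o rest ih =>
    rcases List.pairwise_cons.mp hl with ⟨ho, hrest⟩
    by_cases hF : pvHitF cs n mid o = true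
    · by_cases hB : pvHitB cs mid o = true
      · simp [pvLoopA, hF, hB]
      · cases hfb : rest.find? (fun x => pvHitB cs mid x) with
        | none => simp [pvLoopA, hF, hB, hfb]
        | some b =>
          have hb : o < b := ho b (List.mem_of_find?_eq_some hfb)
          simp [pvLoopA, hF, hB, hfb, le_of_lt hb]
    · by_cases hB : pvHitB cs mid o = true
      · cases hff : rest.find? (fun x => pvHitF cs n mid x) with
        | none => simp [pvLoopA, hF, hB, hff]
        | some f =>
          have hf : o < f := ho f (List.mem_of_find?_eq_some hff)
          have : ¬ f ≤ o := not_le.mpr hf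
          simp [pvLoopA, hF, hB, hff, this]
      · simpa [pvLoopA, hF, hB, List.find?_cons] using ih hrest

lemma pvDrop_half_ne_nil (r : List Char) (hr : r ≠ []) : r.drop (r.length / 2) ≠ [] := by
  have : r.length ≠ 0 := by simpa using fun h => hr (List.eq_nil_of_length_eq_zero h)
  simp [List.drop_eq_nil_iff]
  omega

lemma pvTail_eq (cs : List Char) (best : Int) : pvTailA cs best = pvTailB cs best := by
  unfold pvTailA pvTailB
  set left := PySem.Chars.strip (PySem.List.slice cs none (some best)) with hleft
  set right := PySem.Chars.strip (PySem.List.slice cs (some best) none) with hright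
  by_cases hL : left = []
  · by_cases hR : right = []
    · simp [hL, hR, PySem.List.slice]
    · have h2 : PySem.List.slice right
          (some (((right.length / 2 : Nat) : Int))) none ≠ [] := by
        rw [PySem.List.slice_from_natCast]
        exact pvDrop_half_ne_nil right hR
      have h2' : PySem.List.slice right (some ((right.length : Int) / 2)) none ≠ [] := by
        have e : (right.length : Int) / 2 = ((right.length / 2 : Nat) : Int) := by omega
        rw [e]; exact h2
      simp [hL, h2']
  · by_cases hR : right = []
    · simp [hL, hR]
    · simp [hL, hR]

-- ===== VERDICT (by name: the statement is the Claim_ definition above) =====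
theorem chunk_binary_spec : Claim_equal_chunk_binary := by
  intro text max_chars _
  unfold Spec_chunk_binary chunk_binary chunk_binary_alt
  by_cases h0 : (text = "" || PySem.Str.strip text = "") = true
  · simp [h0]
  · simp only [h0, if_neg, Bool.not_eq_true] at *
    rw [pvLoop_eq _ _ _ _ (PySem.List.pairwise_lt_pyRange_one 0 _)]
    exact pvTail_eq _ _
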